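-- pv_equiv track=rewrite | github.com/eshard/scared | scared/des/base.py | _convert_hypothesis_bits_into_keys
-- ===== SOURCE A (Python) =====
-- def _convert_hypothesis_bits_into_keys(array):
--     len_array = len(array)
--     if len_array == 1:
--         return [array[0]]
--     else:
--         bit = array[0]
--         keys_for_value_0 = _convert_hypothesis_bits_into_keys(array[1:])
--         if not bit:
--             return keys_for_value_0
--         keys_for_value_1 = [hit + (1 << (len_array - 1)) for hit in keys_for_value_0]
--         if bit == 255:
--             # If the bit is unknown, we have to return both the values for bit 0 and 1
--             return keys_for_value_1 + keys_for_value_0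
--         else:
--             return keys_for_value_1
-- ===== SOURCE B (Python) =====
-- def _convert_hypothesis_bits_into_keys(array):
--     last, *rest = array[::-1]
--     keys = [last]
--     w = 1
--     for bit in rest:
--         w <<= 1
--         if bit:
--             shifted = [k + w for k in keys]
--             keys = shifted + keys if bit == 255 else shifted
--     return keys
-- ===== Notes on version B (the rewrite author's own statement) =====
-- stated objective: alternative
-- what changed: Replaces the linear recursion with a single iterative fold over the reversed array that keeps the current bit weight as a doubling accumulator, so there is no recursion, no slicing and no index arithmetic.
import Mathlib
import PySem

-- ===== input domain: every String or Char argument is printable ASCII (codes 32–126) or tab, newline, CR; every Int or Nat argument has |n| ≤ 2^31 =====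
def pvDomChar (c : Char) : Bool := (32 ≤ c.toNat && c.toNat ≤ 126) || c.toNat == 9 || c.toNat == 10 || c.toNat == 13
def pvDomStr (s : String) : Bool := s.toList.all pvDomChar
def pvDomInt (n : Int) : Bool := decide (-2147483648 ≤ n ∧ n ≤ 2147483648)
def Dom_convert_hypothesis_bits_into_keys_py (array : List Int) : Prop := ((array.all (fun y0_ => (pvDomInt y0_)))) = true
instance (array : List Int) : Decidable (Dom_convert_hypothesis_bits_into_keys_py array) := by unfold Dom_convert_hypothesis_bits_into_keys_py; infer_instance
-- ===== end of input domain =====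

-- B replaces A's linear recursion by one iterative fold over the reversed array with a doubling
-- weight accumulator (objective: alternative decomposition, same cost).


-- ===== PORT A =====
-- literal port of the recursion; the [] case is unreachable inside Pre_ (Python raises IndexError there)
def convert_hypothesis_bits_into_keys_py : List Int → List Int
  | [] => []
  | [x] => [x]
  | bit :: c :: rest =>
    let keys_for_value_0 := convert_hypothesis_bits_into_keys_py (c :: rest)
    if bit = 0 then keys_for_value_0
    else
      let keys_for_value_1 := keys_for_value_0.map (· + 2 ^ (rest.length + 1))
      if bit = 255 then keys_for_value_1 ++ keys_for_value_0 else keys_for_value_1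

-- ===== PORT B =====
-- one loop iteration of Source B (w <<= 1, then the bit branches)
def altStep (st : List Int × Int) (bit : Int) : List Int × Int :=
  let w := st.2 * 2
  let keys := st.1
  if bit ≠ 0 then
    let shifted := keys.map (· + w)
    (if bit = 255 then shifted ++ keys else shifted, w)
  else (keys, w)

-- Source B: unpack the reversed array as last :: rest, fold altStep over rest from ([last], 1)
def convert_hypothesis_bits_into_keys_py_alt (array : List Int) : List Int :=
  match array.reverse with
  | [] => []  -- Python raises ValueError here (excluded by Pre_)
  | last :: rest => (rest.foldl altStep ([last], 1)).1

-- ===== PRECONDITION & SPEC =====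
-- on the empty list A raises IndexError (and B raises ValueError), so it is excluded
def Pre_convert_hypothesis_bits_into_keys_py (array : List Int) : Prop := array ≠ []
instance (array : List Int) : Decidable (Pre_convert_hypothesis_bits_into_keys_py array) := by unfold Pre_convert_hypothesis_bits_into_keys_py; infer_instance
def pvWitness_convert_hypothesis_bits_into_keys_py : List Int := [255, 1, 0]

def Spec_convert_hypothesis_bits_into_keys_py (array : List Int) (out : List Int) : Prop := out = convert_hypothesis_bits_into_keys_py_alt array
instance (array : List Int) (out : List Int) : Decidable (Spec_convert_hypothesis_bits_into_keys_py array out) := by unfold Spec_convert_hypothesis_bits_into_keys_py; infer_instance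

-- ===== CLAIM (what is proved, stated in full; the proofs are below) =====
def Claim_equal_convert_hypothesis_bits_into_keys_py : Prop := ∀ (array : List Int), Dom_convert_hypothesis_bits_into_keys_py array → Pre_convert_hypothesis_bits_into_keys_py array → Spec_convert_hypothesis_bits_into_keys_py array (convert_hypothesis_bits_into_keys_py array)

-- ===== LEMMAS AND PROOFS =====

-- invariant of B's fold: after consuming the reversed array minus its head, the state is
-- (A's result, the weight 2^(len-1) of the next bit / last processed position)
theorem altFold_eq (xs : List Int) : ∀ (last : Int) (r : List Int), xs.reverse = last :: r →
    r.foldl altStep ([last], 1) = (convert_hypothesis_bits_into_keys_py xs, 2 ^ (xs.length - 1)) := by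
  induction xs with
  | nil => intro last r h; simp at h
  | cons b rest ih =>
    intro last r h
    cases rest with
    | nil =>
      simp at h
      obtain ⟨h1, h2⟩ := h
      subst h1; subst h2
      simp [convert_hypothesis_bits_into_keys_py]
    | cons c rest' =>
      cases hrev : (c :: rest').reverse with
      | nil => simp [List.reverse_eq_nil_iff] at hrev
      | cons last0 r0 =>
        have hx : (b :: c :: rest').reverse = last0 :: (r0 ++ [b]) := by
          simp [List.reverse_cons, hrev]
        rw [hx] at h
        injection h with h1 h2
        subst h1; subst h2
        rw [List.foldl_append, ih last0 r0 hrev]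
        have hlen : (c :: rest').length - 1 = rest'.length := by simp
        rw [hlen]
        show altStep (convert_hypothesis_bits_into_keys_py (c :: rest'), 2 ^ rest'.length) b
            = (convert_hypothesis_bits_into_keys_py (b :: c :: rest'), 2 ^ ((b :: c :: rest').length - 1))
        simp only [altStep, convert_hypothesis_bits_into_keys_py, List.length_cons]
        have hw : (2 : Int) ^ rest'.length * 2 = 2 ^ (rest'.length + 1) := by ring
        split_ifs with h0 h255 <;> simp [hw] <;> omega

-- ===== VERDICT (by name: the statement is the Claim_ definition above) =====
theorem convert_hypothesis_bits_into_keys_py_spec : Claim_equal_convert_hypothesis_bits_into_keys_py := by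
  intro array _ hpre
  unfold Spec_convert_hypothesis_bits_into_keys_py convert_hypothesis_bits_into_keys_py_alt
  cases hrev : array.reverse with
  | nil => exact absurd (List.reverse_eq_nil_iff.mp hrev) hpre
  | cons last r =>
    show convert_hypothesis_bits_into_keys_py array = (r.foldl altStep ([last], 1)).1
    rw [altFold_eq array last r hrev]
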